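-- pv_equiv track=rewrite | github.com/Pradhuman0012/DSA-Questions | Arrays/40_closest_min_max.py | closest_min_max
-- ===== SOURCE A (Python) =====
-- def closest_min_max(arr):
--     n=len(arr)
--     mx=arr[0]
--     mn=arr[0]
--     min_index=-1
--     max_index=-1
--
--     for num in arr:
--         mx= num if num>mx else mx
--         mn= num if num<mn else mn
--     ans=n
--
--
--     for i in range(n-1,-1,-1):
--         if arr[i]==mn:
--             min_index=i
--             if max_index != -1:
--                 res=(max_index-min_index)+1
--                 if res<ans:
--                     ans=res
--
--         if arr[i]==mx:
--             max_index=i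
--             if min_index != -1:
--                 res=(min_index-max_index)+1
--                 if res<ans:
--                     ans=res
--     return ans
--
-- arr=[1,2,3,1,3,4,6,4,6,3]
--
-- res= closest_min_max(arr)
-- ===== SOURCE B (Python) =====
-- def closest_min_max(arr):
--     mn = mx = arr[0]
--     for v in arr:
--         if v < mn:
--             mn = v
--         if v > mx:
--             mx = v
--     mins = [i for i, v in enumerate(arr) if v == mn]
--     maxs = [i for i, v in enumerate(arr) if v == mx]
--     i = j = 0
--     best = abs(mins[0] - maxs[0])
--     while i < len(mins) and j < len(maxs):
--         d = abs(mins[i] - maxs[j])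
--         if d < best:
--             best = d
--         if mins[i] < maxs[j]:
--             i += 1
--         else:
--             j += 1
--     return best + 1
-- ===== Notes on version B (the rewrite author's own statement) =====
-- stated objective: alternative
-- what changed: A's single backward scan that threads three state variables (nearest min/max index seen so far and a running answer) is replaced by computing min/max, collecting the two sorted position lists in one forward pass, and a two-pointer merge of those lists minimizing |p-q|.
import Mathlib
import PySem

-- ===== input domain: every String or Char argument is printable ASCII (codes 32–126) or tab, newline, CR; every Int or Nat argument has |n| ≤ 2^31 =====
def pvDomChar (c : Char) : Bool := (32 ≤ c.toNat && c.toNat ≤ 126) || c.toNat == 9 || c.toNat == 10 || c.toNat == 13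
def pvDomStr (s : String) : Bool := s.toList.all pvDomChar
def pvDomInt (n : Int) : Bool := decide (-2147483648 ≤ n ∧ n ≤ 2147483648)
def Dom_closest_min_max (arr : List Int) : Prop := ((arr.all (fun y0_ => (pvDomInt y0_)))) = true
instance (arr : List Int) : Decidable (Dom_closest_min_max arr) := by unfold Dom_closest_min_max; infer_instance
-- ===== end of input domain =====

-- B replaces A's backward stateful scan by extracting min/max position lists and a two-pointer merge; objective: alternative (same cost, different algorithm).


-- ===== PORT A =====
-- loop body of A's backward index scan; state = (min_index, max_index, ans)
def stepA (arr : List Int) (mn mx : Int) (st : Int × Int × Int) (i : Int) : Int × Int × Int :=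
  let mi := st.1
  let ma := st.2.1
  let ans := st.2.2
  let p1 : Int × Int :=
    if PySem.List.pyGetD arr i 0 == mn then
      (i, if ma != -1 then
            (let res := (ma - i) + 1; if res < ans then res else ans)
          else ans)
    else (mi, ans)
  let p2 : Int × Int :=
    if PySem.List.pyGetD arr i 0 == mx then
      (i, if p1.1 != -1 then
            (let res := (p1.1 - i) + 1; if res < p1.2 then res else p1.2)
          else p1.2)
    else (ma, p1.2)
  (p1.1, p2.1, p2.2)

def closest_min_max (arr : List Int) : Int :=
  let n : Int := arr.length
  match PySem.List.pyGet? arr 0 with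
  | none => 0   -- Python raises IndexError on empty arr; excluded by Pre_
  | some a0 =>
    -- single loop updating (mx, mn), as in A
    let mm := arr.foldl (fun (p : Int × Int) num =>
        (if num > p.1 then num else p.1, if num < p.2 then num else p.2)) (a0, a0)
    ((PySem.List.pyRange (n - 1) (-1) (-1)).foldl (stepA arr mm.2 mm.1) (-1, -1, n)).2.2

-- ===== PORT B =====
-- two-pointer merge over the sorted position lists, tracking the best |p-q|
def tpB : List Int → List Int → Int → Int
  | x :: xs, y :: ys, best =>
    let d := |x - y|
    let best2 := if d < best then d else best
    if x < y then tpB xs (y :: ys) best2 else tpB (x :: xs) ys best2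
  | [], _, best => best
  | _ :: _, [], best => best
termination_by xs ys _ => xs.length + ys.length

def closest_min_max_alt (arr : List Int) : Int :=
  match arr with
  | [] => 0   -- Python raises IndexError on empty arr; excluded by Pre_
  | a :: _ =>
    let mm := arr.foldl (fun (p : Int × Int) v =>
        (if v < p.1 then v else p.1, if v > p.2 then v else p.2)) (a, a)
    let mins := ((PySem.List.enumerate arr 0).filter (fun p => p.2 == mm.1)).map (fun p => p.1)
    let maxs := ((PySem.List.enumerate arr 0).filter (fun p => p.2 == mm.2)).map (fun p => p.1)
    tpB mins maxs (|mins.headD 0 - maxs.headD 0|) + 1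

-- ===== PRECONDITION & SPEC =====
-- A raises IndexError (arr[0]) on the empty list; Pre_ excludes exactly that input.
def Pre_closest_min_max (arr : List Int) : Prop := arr ≠ []
instance (arr : List Int) : Decidable (Pre_closest_min_max arr) := by unfold Pre_closest_min_max; infer_instance
def pvWitness_closest_min_max : List Int := [1, 2, 3, 1, 3, 4, 6, 4, 6, 3]

def Spec_closest_min_max (arr : List Int) (out : Int) : Prop := out = closest_min_max_alt arr
instance (arr : List Int) (out : Int) : Decidable (Spec_closest_min_max arr out) := by unfold Spec_closest_min_max; infer_instance

-- ===== CLAIM (what is proved, stated in full; the proofs are below) =====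
def Claim_equal_closest_min_max : Prop := ∀ (arr : List Int), Dom_closest_min_max arr → Pre_closest_min_max arr → Spec_closest_min_max arr (closest_min_max arr)

-- ===== LEMMAS AND PROOFS =====

lemma foldl_choice_mem (f : Int → Int → Int) (hf : ∀ m v, f m v = m ∨ f m v = v) :
    ∀ (l : List Int) (m : Int), l.foldl f m = m ∨ l.foldl f m ∈ l := by
  intro l
  induction l with
  | nil => intro m; simp
  | cons a t ih =>
    intro m
    rw [List.foldl_cons]
    rcases ih (f m a) with h | h
    · rw [h]
      rcases hf m a with h2 | h2
      · left; exact h2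
      · right; simp [h2]
    · right; exact List.mem_cons_of_mem _ h

lemma foldl_pair (f g : Int → Int → Int) :
    ∀ (l : List Int) (x y : Int),
      l.foldl (fun (p : Int × Int) v => (f p.1 v, g p.2 v)) (x, y) = (l.foldl f x, l.foldl g y) := by
  intro l
  induction l with
  | nil => intro x y; rfl
  | cons a t ih => intro x y; simpa [List.foldl] using ih (f x a) (g y a)

def posList (arr : List Int) (c : Int) : List Int :=
  ((PySem.List.enumerate arr 0).filter (fun p => p.2 == c)).map (fun p => p.1)

lemma mem_posList {arr : List Int} {c x : Int} :
    x ∈ posList arr c ↔ 0 ≤ x ∧ x < (arr.length : Int) ∧ PySem.List.pyGetD arr x 0 = c := by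
  simp only [posList, List.mem_map, List.mem_filter, PySem.List.mem_enumerate_iff]
  constructor
  · rintro ⟨p, ⟨⟨k, hk, rfl⟩, hc⟩, rfl⟩
    simp only [beq_iff_eq] at hc
    refine ⟨by positivity, by simpa using hk, ?_⟩
    simp [PySem.List.pyGetD_natCast, List.getD_eq_getElem?_getD, hk, hc]
  · rintro ⟨h0, h1, hg⟩
    rw [PySem.List.pyGetD_eq_getElem _ _ h0 h1] at hg
    exact ⟨(x, c), ⟨⟨x.toNat, by omega, by simp [Int.toNat_of_nonneg h0, hg]⟩, by simp⟩, rfl⟩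

lemma pairwise_posList (arr : List Int) (c : Int) : (posList arr c).Pairwise (· < ·) := by
  unfold posList
  exact List.Pairwise.map _ (fun a b h => h)
    (List.Pairwise.sublist List.filter_sublist (PySem.List.pairwise_lt_enumerate arr 0))

lemma posList_ne_nil {arr : List Int} {c : Int} (h : c ∈ arr) : posList arr c ≠ [] := by
  obtain ⟨k, hk, rfl⟩ := List.mem_iff_getElem.mp h
  have : (k : Int) ∈ posList arr arr[k] := by
    rw [mem_posList]
    refine ⟨by positivity, by exact_mod_cast hk, ?_⟩
    rw [PySem.List.pyGetD_natCast]
    simp [List.getD_eq_getElem?_getD, hk]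
  exact List.ne_nil_of_mem this

-- tpB bounds
lemma tp_le_init : ∀ (M X : List Int) (b : Int), tpB M X b ≤ b := by
  intro M X b
  induction M, X, b using tpB.induct with
  | case1 x xs y ys best d best2 hlt ih =>
    rw [tpB]; rw [if_pos hlt]
    refine le_trans ih ?_; simp only [best2, d]; split <;> omega
  | case2 x xs y ys best d best2 hlt ih =>
    rw [tpB]; rw [if_neg hlt]
    refine le_trans ih ?_; simp only [best2, d]; split <;> omega
  | case3 X b => rw [tpB]
  | case4 x xs b => rw [tpB]

lemma tp_witness : ∀ (M X : List Int) (b : Int),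
    tpB M X b = b ∨ ∃ p ∈ M, ∃ q ∈ X, tpB M X b = |p - q| := by
  intro M X b
  induction M, X, b using tpB.induct with
  | case1 x xs y ys best d best2 hlt ih =>
    have hb2 : (if |x - y| < best then |x - y| else best) = best2 := rfl
    rw [tpB, if_pos hlt, hb2]
    rcases ih with h | ⟨p, hp, q, hq, h⟩
    · by_cases hd : |x - y| < best
      · right
        refine ⟨x, List.mem_cons_self, y, List.mem_cons_self, ?_⟩
        rw [h]; simp only [best2, d]; simp [hd]
      · left; rw [h]; simp only [best2, d]; simp [hd]
    · right; exact ⟨p, List.mem_cons_of_mem _ hp, q, hq, h⟩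
  | case2 x xs y ys best d best2 hlt ih =>
    have hb2 : (if |x - y| < best then |x - y| else best) = best2 := rfl
    rw [tpB, if_neg hlt, hb2]
    rcases ih with h | ⟨p, hp, q, hq, h⟩
    · by_cases hd : |x - y| < best
      · right
        refine ⟨x, List.mem_cons_self, y, List.mem_cons_self, ?_⟩
        rw [h]; simp only [best2, d]; simp [hd]
      · left; rw [h]; simp only [best2, d]; simp [hd]
    · right; exact ⟨p, hp, q, List.mem_cons_of_mem _ hq, h⟩
  | case3 X b => left; rw [tpB]
  | case4 x xs b => left; rw [tpB]

lemma tp_le_pairs : ∀ (M X : List Int) (b : Int), M.Pairwise (· ≤ ·) → X.Pairwise (· ≤ ·) →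
    ∀ p ∈ M, ∀ q ∈ X, tpB M X b ≤ |p - q| := by
  intro M X b
  induction M, X, b using tpB.induct with
  | case1 x xs y ys best d best2 hlt ih =>
    intro hM hX p hp q hq
    have hb2 : (if |x - y| < best then |x - y| else best) = best2 := rfl
    rw [tpB, if_pos hlt, hb2]
    rcases List.mem_cons.mp hp with rfl | hp'
    · have h1 : tpB xs (y :: ys) best2 ≤ best2 := tp_le_init _ _ _
      have h2 : best2 ≤ |p - y| := by simp only [best2, d]; split <;> omega
      have h3 : y ≤ q := by
        rcases List.mem_cons.mp hq with rfl | hq'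
        · exact le_refl _
        · exact List.rel_of_pairwise_cons hX hq'
      have e1 : |p - y| = y - p := by rw [abs_of_nonpos (by omega)]; ring
      have e2 : |p - q| = q - p := by rw [abs_of_nonpos (by omega)]; ring
      omega
    · exact ih hM.of_cons hX p hp' q hq
  | case2 x xs y ys best d best2 hlt ih =>
    intro hM hX p hp q hq
    have hb2 : (if |x - y| < best then |x - y| else best) = best2 := rfl
    rw [tpB, if_neg hlt, hb2]
    rcases List.mem_cons.mp hq with rfl | hq'
    · have h1 : tpB (x :: xs) ys best2 ≤ best2 := tp_le_init _ _ _
      have h2 : best2 ≤ |x - q| := by simp only [best2, d]; split <;> omega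
      have h3 : x ≤ p := by
        rcases List.mem_cons.mp hp with rfl | hp'
        · exact le_refl _
        · exact List.rel_of_pairwise_cons hM hp'
      have e1 : |x - q| = x - q := by rw [abs_of_nonneg (by omega)]
      have e2 : |p - q| = p - q := by rw [abs_of_nonneg (by omega)]
      omega
    · exact ih hM hX.of_cons p hp q hq'
  | case3 X b => intro _ _ p hp; simp at hp
  | case4 x xs b => intro _ _ p hp q hq; simp at hq

def InvA (n : Int) (M X : List Int) (st : Int × Int × Int) (i : Int) : Prop :=
  ((st.1 = -1 ∧ ∀ p ∈ M, p ≤ i) ∨ (st.1 ∈ M ∧ i < st.1 ∧ ∀ p ∈ M, i < p → st.1 ≤ p)) ∧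
  ((st.2.1 = -1 ∧ ∀ q ∈ X, q ≤ i) ∨ (st.2.1 ∈ X ∧ i < st.2.1 ∧ ∀ q ∈ X, i < q → st.2.1 ≤ q)) ∧
  1 ≤ st.2.2 ∧ st.2.2 ≤ n ∧
  (st.2.2 = n ∨ ∃ p ∈ M, ∃ q ∈ X, st.2.2 = |p - q| + 1) ∧
  (∀ p ∈ M, ∀ q ∈ X, i < p → i < q → st.2.2 ≤ |p - q| + 1)

lemma stepA_inv (arr : List Int) (mn mx : Int) (n : Int)
    (M X : List Int)
    (hM : ∀ x, x ∈ M ↔ 0 ≤ x ∧ x < n ∧ PySem.List.pyGetD arr x 0 = mn)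
    (hX : ∀ x, x ∈ X ↔ 0 ≤ x ∧ x < n ∧ PySem.List.pyGetD arr x 0 = mx)
    (st : Int × Int × Int) (i : Int) (hi0 : 0 ≤ i) (hin : i < n)
    (h : InvA n M X st i) : InvA n M X (stepA arr mn mx st i) (i - 1) := by
  obtain ⟨mi, ma, ans⟩ := st
  obtain ⟨h1, h2, hans1, hans2, hw, hu⟩ := h
  simp only at h1 h2 hans1 hans2 hw hu
  have hMpos : ∀ p ∈ M, 0 ≤ p := fun p hp => ((hM p).mp hp).1
  have hXpos : ∀ q ∈ X, 0 ≤ q := fun q hq => ((hX q).mp hq).1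
  by_cases hmn : PySem.List.pyGetD arr i 0 = mn <;>
    by_cases hmx : PySem.List.pyGetD arr i 0 = mx
  · -- arr[i] = mn and arr[i] = mx
    have hmm : mn = mx := hmn.symm.trans hmx
    subst hmm
    have hiM : i ∈ M := (hM i).mpr ⟨hi0, hin, hmn⟩
    have hiX : i ∈ X := (hX i).mpr ⟨hi0, hin, hmn⟩
    have hine : ¬ i = -1 := by omega
    have hmanum : ma = -1 ∨ i < ma := by
      rcases h2 with ⟨e, _⟩ | ⟨_, hlt, _⟩
      exacts [Or.inl e, Or.inr hlt]
    simp only [stepA, hmn, beq_self_eq_true, if_true, bne_iff_ne, ne_eq, hine,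
      not_false_eq_true]
    unfold InvA
    split_ifs <;> (try dsimp only) <;>
      exact ⟨Or.inr ⟨hiM, by omega, fun p hp hpi => by omega⟩,
        Or.inr ⟨hiX, by omega, fun q hq hqi => by omega⟩,
        by omega, by omega,
        Or.inr ⟨i, hiM, i, hiX, by simp only [sub_self, abs_zero]; try omega⟩,
        fun p hp q hq _ _ => by have := abs_nonneg (p - q); omega⟩
  · -- arr[i] = mn only
    have hiM : i ∈ M := (hM i).mpr ⟨hi0, hin, hmn⟩
    have hiX : i ∉ X := fun hc => hmx ((hX i).mp hc).2.2
    have hne : ¬ mn = mx := fun e => hmx (hmn.trans e)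
    have hine : ¬ i = -1 := by omega
    simp only [stepA, hmn, beq_self_eq_true, if_true, beq_iff_eq, hne, if_false,
      bne_iff_ne, ne_eq]
    unfold InvA
    dsimp only
    refine ⟨Or.inr ⟨hiM, by omega, fun p hp hpi => by omega⟩, ?_⟩
    rcases h2 with ⟨hmae, hmale⟩ | ⟨hmaX, hmai, hmale⟩
    · -- no max position > i yet
      have hcond : ¬ ¬ ma = -1 := by omega
      rw [if_neg hcond]
      refine ⟨Or.inl ⟨hmae, fun q hq => ?_⟩, hans1, hans2, hw,
        fun p hp q hq hpi hqi => ?_⟩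
      · have hq' := hmale q hq
        have : q ≠ i := fun e => hiX (e ▸ hq)
        omega
      · have hqne : q ≠ i := fun e => hiX (e ▸ hq)
        exact absurd (hmale q hq) (by omega)
    · have hmane : ¬ ma = -1 := by have := hXpos ma hmaX; omega
      rw [if_pos hmane]
      refine ⟨Or.inr ⟨hmaX, by omega, fun q hq hqi => ?_⟩, ?_, ?_, ?_, ?_⟩
      · have : q ≠ i := fun e => hiX (e ▸ hq)
        exact hmale q hq (by omega)
      · split_ifs <;> omega
      · split_ifs <;> omega
      · split_ifs with hr
        · refine Or.inr ⟨i, hiM, ma, hmaX, ?_⟩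
          have habs : |i - ma| = ma - i := by rw [abs_of_nonpos (by omega)]; ring
          omega
        · exact hw
      · intro p hp q hq hpi hqi
        have hqne : q ≠ i := fun e => hiX (e ▸ hq)
        rcases eq_or_lt_of_le (by omega : i ≤ p) with heq | hpi'
        · have hq2 := hmale q hq (by omega)
          have habs2 : |p - q| = q - p := by rw [abs_of_nonpos (by omega)]; ring
          split_ifs <;> omega
        · have := hu p hp q hq hpi' (by omega)
          split_ifs <;> omega
  · -- arr[i] = mx only
    have hiX : i ∈ X := (hX i).mpr ⟨hi0, hin, hmx⟩
    have hiM : i ∉ M := fun hc => hmn ((hM i).mp hc).2.2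
    have hne3 : ¬ mx = mn := fun e => hmn (hmx.trans e)
    have hine : ¬ i = -1 := by omega
    have hMstep : (mi = -1 ∧ ∀ p ∈ M, p ≤ i - 1) ∨ (mi ∈ M ∧ i - 1 < mi ∧ ∀ p ∈ M, i - 1 < p → mi ≤ p) := by
      rcases h1 with ⟨hmie, hmile⟩ | ⟨hmiM, hmii, hmile⟩
      · refine Or.inl ⟨hmie, fun p hp => ?_⟩
        have : p ≠ i := fun e => hiM (e ▸ hp)
        have := hmile p hp
        omega
      · exact Or.inr ⟨hmiM, by omega, fun p hp hpi => by
          have : p ≠ i := fun e => hiM (e ▸ hp)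
          exact hmile p hp (by omega)⟩
    simp only [stepA, hmx, beq_self_eq_true, if_true, beq_iff_eq, hne3, if_false,
      bne_iff_ne, ne_eq]
    unfold InvA
    dsimp only
    rcases h1 with ⟨hmie, hmile⟩ | ⟨hmiM, hmii, hmile⟩
    · have hcond : ¬ ¬ mi = -1 := by omega
      rw [if_neg hcond]
      refine ⟨hMstep, Or.inr ⟨hiX, by omega, fun q hq hqi => by omega⟩, hans1, hans2, hw,
        fun p hp q hq hpi hqi => ?_⟩
      have hpne : p ≠ i := fun e => hiM (e ▸ hp)
      exact absurd (hmile p hp) (by omega)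
    · have hmine : ¬ mi = -1 := by have := hMpos mi hmiM; omega
      rw [if_pos hmine]
      refine ⟨hMstep, Or.inr ⟨hiX, by omega, fun q hq hqi => by omega⟩, ?_, ?_, ?_, ?_⟩
      · split_ifs <;> omega
      · split_ifs <;> omega
      · split_ifs with hr
        · refine Or.inr ⟨mi, hmiM, i, hiX, ?_⟩
          have habs : |mi - i| = mi - i := by rw [abs_of_nonneg (by omega)]
          omega
        · exact hw
      · intro p hp q hq hpi hqi
        have hpne : p ≠ i := fun e => hiM (e ▸ hp)
        rcases eq_or_lt_of_le (by omega : i ≤ q) with heq | hqi'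
        · have hp2 := hmile p hp (by omega)
          have habs2 : |p - q| = p - q := by rw [abs_of_nonneg (by omega)]
          split_ifs <;> omega
        · have := hu p hp q hq (by omega) hqi'
          split_ifs <;> omega
  · -- neither
    have hiM : i ∉ M := fun hc => hmn ((hM i).mp hc).2.2
    have hiX : i ∉ X := fun hc => hmx ((hX i).mp hc).2.2
    simp only [stepA, beq_iff_eq, hmn, hmx, if_false]
    unfold InvA
    dsimp only
    refine ⟨?_, ?_, hans1, hans2, hw, fun p hp q hq hpi hqi => ?_⟩
    · rcases h1 with ⟨hmie, hmile⟩ | ⟨hmiM, hmii, hmile⟩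
      · refine Or.inl ⟨hmie, fun p hp => ?_⟩
        have : p ≠ i := fun e => hiM (e ▸ hp)
        have := hmile p hp
        omega
      · exact Or.inr ⟨hmiM, by omega, fun p hp hpi => by
          have : p ≠ i := fun e => hiM (e ▸ hp)
          exact hmile p hp (by omega)⟩
    · rcases h2 with ⟨hmae, hmale⟩ | ⟨hmaX, hmai, hmale⟩
      · refine Or.inl ⟨hmae, fun q hq => ?_⟩
        have : q ≠ i := fun e => hiX (e ▸ hq)
        have := hmale q hq
        omega
      · exact Or.inr ⟨hmaX, by omega, fun q hq hqi => by
          have : q ≠ i := fun e => hiX (e ▸ hq)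
          exact hmale q hq (by omega)⟩
    · have hpne : p ≠ i := fun e => hiM (e ▸ hp)
      have hqne : q ≠ i := fun e => hiX (e ▸ hq)
      exact hu p hp q hq (by omega) (by omega)

lemma loopA_inv (arr : List Int) (mn mx n : Int) (M X : List Int)
    (hM : ∀ x, x ∈ M ↔ 0 ≤ x ∧ x < n ∧ PySem.List.pyGetD arr x 0 = mn)
    (hX : ∀ x, x ∈ X ↔ 0 ≤ x ∧ x < n ∧ PySem.List.pyGetD arr x 0 = mx) :
    ∀ (k : Nat) (st : Int × Int × Int), (k : Int) ≤ n → InvA n M X st ((k : Int) - 1) →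
      InvA n M X ((PySem.List.pyRange ((k : Int) - 1) (-1) (-1)).foldl (stepA arr mn mx) st) (-1) := by
  intro k
  induction k with
  | zero =>
    intro st _ h
    rw [show ((0 : Nat) : Int) - 1 = -1 by norm_num, PySem.List.pyRange_neg_one_eq_nil (by norm_num)]
    simpa using h
  | succ m ih =>
    intro st hk h
    have hcast : ((m + 1 : Nat) : Int) - 1 = (m : Int) := by push_cast; ring
    rw [hcast] at h ⊢
    rw [PySem.List.pyRange_neg_one_cons (by omega : (-1 : Int) < (m : Int))]
    rw [List.foldl_cons]
    have hstep := stepA_inv arr mn mx n M X hM hX st (m : Int) (by omega) (by omega) h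
    have := ih (stepA arr mn mx st (m : Int)) (by omega) (by
      rw [show ((m : Nat) : Int) - 1 = (m : Int) - 1 by norm_num]
      exact hstep)
    rw [show ((m : Nat) : Int) - 1 = (m : Int) - 1 by norm_num] at this
    exact this

lemma foldl_pairA (l : List Int) (x : Int) :
    l.foldl (fun (p : Int × Int) num => (if num > p.1 then num else p.1, if num < p.2 then num else p.2)) (x, x)
      = (l.foldl (fun m v => if v > m then v else m) x, l.foldl (fun m v => if v < m then v else m) x) :=
  foldl_pair (fun m num => if num > m then num else m) (fun m num => if num < m then num else m) l x x

lemma foldl_pairB (l : List Int) (x : Int) :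
    l.foldl (fun (p : Int × Int) v => (if v < p.1 then v else p.1, if v > p.2 then v else p.2)) (x, x)
      = (l.foldl (fun m v => if v < m then v else m) x, l.foldl (fun m v => if v > m then v else m) x) :=
  foldl_pair (fun m v => if v < m then v else m) (fun m v => if v > m then v else m) l x x

lemma hM_posList (arr : List Int) (c : Int) :
    ∀ x, x ∈ posList arr c ↔ 0 ≤ x ∧ x < (arr.length : Int) ∧ PySem.List.pyGetD arr x 0 = c :=
  fun _ => mem_posList

lemma portA_eq (a : Int) (t : List Int) :
    closest_min_max (a :: t) =
      ((PySem.List.pyRange (((a :: t).length : Int) - 1) (-1) (-1)).foldl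
        (stepA (a :: t)
          ((a :: t).foldl (fun m v => if v < m then v else m) a)
          ((a :: t).foldl (fun m v => if v > m then v else m) a))
        (-1, -1, ((a :: t).length : Int))).2.2 := by
  unfold closest_min_max
  have hget : PySem.List.pyGet? (a :: t) 0 = some a := by
    simp [PySem.List.pyGet?, PySem.List.pyIdx?]
  rw [hget]
  dsimp only
  rw [foldl_pairA]

lemma portB_eq (a : Int) (t : List Int) :
    closest_min_max_alt (a :: t) =
      tpB (posList (a :: t) ((a :: t).foldl (fun m v => if v < m then v else m) a))
          (posList (a :: t) ((a :: t).foldl (fun m v => if v > m then v else m) a))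
          (|(posList (a :: t) ((a :: t).foldl (fun m v => if v < m then v else m) a)).headD 0 -
            (posList (a :: t) ((a :: t).foldl (fun m v => if v > m then v else m) a)).headD 0|) + 1 := by
  unfold closest_min_max_alt posList
  dsimp only
  rw [foldl_pairB]

lemma main_eq (a : Int) (t : List Int) :
    closest_min_max (a :: t) = closest_min_max_alt (a :: t) := by
  rw [portA_eq, portB_eq]
  set arr := a :: t with harr
  set n : Int := (arr.length : Int) with hn
  set mn := arr.foldl (fun m v => if v < m then v else m) a with hmn
  set mx := arr.foldl (fun m v => if v > m then v else m) a with hmx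
  set M := posList arr mn with hMdef
  set X := posList arr mx with hXdef
  have hM := hM_posList arr mn
  have hX := hM_posList arr mx
  have hn1 : 1 ≤ n := by
    rw [hn, harr]; simp only [List.length_cons]; push_cast; omega
  -- mn, mx are elements of arr
  have hmnmem : mn ∈ arr := by
    rcases foldl_choice_mem (fun m v => if v < m then v else m) (fun m v => by by_cases h : v < m <;> simp [h]) arr a with h | h
    · rw [hmn, h, harr]; exact List.mem_cons_self
    · rw [hmn]; exact h
  have hmxmem : mx ∈ arr := by
    rcases foldl_choice_mem (fun m v => if v > m then v else m) (fun m v => by by_cases h : v > m <;> simp [h]) arr a with h | h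
    · rw [hmx, h, harr]; exact List.mem_cons_self
    · rw [hmx]; exact h
  obtain ⟨m0, M', hMeq⟩ := List.exists_cons_of_ne_nil (hMdef ▸ posList_ne_nil hmnmem)
  obtain ⟨x0, X', hXeq⟩ := List.exists_cons_of_ne_nil (hXdef ▸ posList_ne_nil hmxmem)
  have hm0 : m0 ∈ M := by rw [hMeq]; exact List.mem_cons_self
  have hx0 : x0 ∈ X := by rw [hXeq]; exact List.mem_cons_self
  have hMb : ∀ p ∈ M, 0 ≤ p ∧ p < n := fun p hp => ⟨((hM p).mp hp).1, ((hM p).mp hp).2.1⟩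
  have hXb : ∀ q ∈ X, 0 ≤ q ∧ q < n := fun q hq => ⟨((hX q).mp hq).1, ((hX q).mp hq).2.1⟩
  -- run the loop invariant
  have hinit : InvA n M X (-1, -1, n) ((n.toNat : Int) - 1) := by
    refine ⟨Or.inl ⟨rfl, fun p hp => ?_⟩, Or.inl ⟨rfl, fun q hq => ?_⟩, by omega, le_refl n,
      Or.inl rfl, fun p hp q hq hpi hqi => ?_⟩
    · have := (hMb p hp).2; omega
    · have := (hXb q hq).2; omega
    · have := (hMb p hp).2; omega
  have hfin := loopA_inv arr mn mx n M X hM hX n.toNat (-1, -1, n) (by omega) hinit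
  rw [show ((n.toNat : Nat) : Int) - 1 = n - 1 by omega] at hfin
  obtain ⟨_, _, hans1, hans2, hwF, huF⟩ := hfin
  set ansF := ((PySem.List.pyRange (n - 1) (-1) (-1)).foldl (stepA arr mn mx) (-1, -1, n)).2.2 with hansF
  -- two-pointer value
  have hsortM : M.Pairwise (· ≤ ·) := (pairwise_posList arr mn).imp le_of_lt
  have hsortX : X.Pairwise (· ≤ ·) := (pairwise_posList arr mx).imp le_of_lt
  have hhead : (|M.headD 0 - X.headD 0|) = |m0 - x0| := by rw [hMeq, hXeq]; rfl
  set tpv := tpB M X (|M.headD 0 - X.headD 0|) with htpv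
  have htp_init : tpv ≤ |m0 - x0| := by rw [htpv, hhead]; exact tp_le_init _ _ _
  have htp_pairs := fun p hp q hq => tp_le_pairs M X (|M.headD 0 - X.headD 0|) hsortM hsortX p hp q hq
  have htp_wit := tp_witness M X (|M.headD 0 - X.headD 0|)
  -- ansF = tpv + 1
  have hle : ansF ≤ tpv + 1 := by
    rcases htp_wit with h | ⟨p, hp, q, hq, h⟩
    · have := huF m0 hm0 x0 hx0 (by have := (hMb m0 hm0).1; omega) (by have := (hXb x0 hx0).1; omega)
      rw [← htpv] at h
      rw [h, hhead]
      exact this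
    · have := huF p hp q hq (by have := (hMb p hp).1; omega) (by have := (hXb q hq).1; omega)
      rw [← htpv] at h
      rw [h]
      exact this
  have hge : tpv + 1 ≤ ansF := by
    rcases hwF with h | ⟨p, hp, q, hq, h⟩
    · have hb1 := (hMb m0 hm0); have hb2 := (hXb x0 hx0)
      have habs : |m0 - x0| ≤ n - 1 := by rcases abs_cases (m0 - x0) with ⟨e, _⟩ | ⟨e, _⟩ <;> omega
      omega
    · have := htp_pairs p hp q hq
      omega
  omega

-- ===== VERDICT (by name: the statement is the Claim_ definition above) =====
theorem closest_min_max_spec : Claim_equal_closest_min_max := by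
  intro arr _ hpre
  unfold Spec_closest_min_max
  match arr with
  | [] => exact absurd rfl hpre
  | a :: t => exact main_eq a t
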